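-- pv_equiv track=rewrite | github.com/rogerlew/wepppy | wepppy/weppcloud/routes/weppcloud_site.py | _path_variants
-- ===== SOURCE A (Python) =====
-- from typing import Any, Dict, List, Optional
--
-- def _normalized_cookie_path(value: Optional[str]) -> str:
--     path = str(value or "").strip()
--     if not path:
--         return "/"
--     if not path.startswith("/"):
--         path = f"/{path}"
--     if len(path) > 1 and path.endswith("/"):
--         path = path.rstrip("/")
--     return path or "/"
--
-- def _path_variants(value: Optional[str]) -> list[str]:
--     candidates: list[str] = []
--     raw = str(value or "").strip()
--     if raw:
--         candidates.append(raw)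
--     normalized = _normalized_cookie_path(value)
--     candidates.append(normalized)
--     if normalized != "/":
--         candidates.append(f"{normalized}/")
--
--     variants: list[str] = []
--     for candidate in candidates:
--         normalized_candidate = _normalized_cookie_path(candidate)
--         if normalized_candidate not in variants:
--             variants.append(normalized_candidate)
--         if (
--             normalized_candidate != "/"
--             and not normalized_candidate.endswith("/")
--             and f"{normalized_candidate}/" not in variants
--         ):
--             variants.append(f"{normalized_candidate}/")
--     return variants
-- ===== SOURCE B (Python) =====
-- from typing import Optional
--
--
-- def _normalized_cookie_path(value: Optional[str]) -> str:
--     path = str(value or "").strip()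
--     if not path:
--         return "/"
--     if not path.startswith("/"):
--         path = f"/{path}"
--     if len(path) > 1 and path.endswith("/"):
--         path = path.rstrip("/")
--     return path or "/"
--
--
-- def _path_variants(value: Optional[str]) -> list[str]:
--     """Return the normalized cookie path together with its trailing-slash twin.
--
--     Normalization is not idempotent: stripping trailing slashes can expose
--     trailing whitespace ('/a /' normalizes to '/a ', which in turn normalizes
--     to '/a'), so a second pass contributes one more, fully cleaned pair.
--     """
--     base = _normalized_cookie_path(value)
--     if base == "/":
--         return ["/"]
--     variants = [base, base + "/"]
--     again = _normalized_cookie_path(base)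
--     if again != base:
--         variants += ["/"] if again == "/" else [again, again + "/"]
--     return variants
-- ===== Notes on version B (the rewrite author's own statement) =====
-- stated objective: simpler
-- what changed: Replaces A's candidate list, per-candidate normalization loop and membership-based dedup with a direct construction: emit the normalized base and its trailing-slash twin, plus one more pair from a second normalization pass (the helper is not idempotent when stripping trailing slashes exposes trailing whitespace).
import Mathlib
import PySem

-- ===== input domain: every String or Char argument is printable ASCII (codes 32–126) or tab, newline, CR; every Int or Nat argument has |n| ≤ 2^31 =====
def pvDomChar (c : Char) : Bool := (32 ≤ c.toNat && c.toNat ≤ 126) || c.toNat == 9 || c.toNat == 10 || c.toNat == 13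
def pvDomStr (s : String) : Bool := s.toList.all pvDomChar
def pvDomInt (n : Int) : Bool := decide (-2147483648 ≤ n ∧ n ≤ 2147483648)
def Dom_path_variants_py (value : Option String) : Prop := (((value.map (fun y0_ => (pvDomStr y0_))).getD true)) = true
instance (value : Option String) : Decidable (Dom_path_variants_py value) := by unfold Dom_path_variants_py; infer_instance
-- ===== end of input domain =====

-- B replaces A's candidate loop and membership dedup with a direct construction:
-- the normalized base, its trailing-slash twin, and one more pair from a second
-- normalization pass (the helper is not idempotent); simpler, same cost.


-- ===== PORT A =====
-- shared module helper `_normalized_cookie_path`, on the code-point list level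
-- `path.rstrip("/")`: hand port (PySem has no right-strip with a custom char set);
-- exact: drops exactly the maximal run of trailing '/' characters
def pvRstripSlash (cs : List Char) : List Char :=
  (cs.reverse.dropWhile (fun c => c == '/')).reverse

-- body of `_normalized_cookie_path` after `path = str(value or "").strip()`
def normCookieCore (path : List Char) : List Char :=
  if path = [] then ['/']
  else
    let path1 := if PySem.Chars.startswith path ['/'] then path else '/' :: path
    let path2 := if decide (1 < path1.length) && PySem.Chars.endswith path1 ['/']
                 then pvRstripSlash path1 else path1
    if path2 = [] then ['/'] else path2

-- `_normalized_cookie_path` applied to a str argument (str(s or "") = s for str s;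
-- for s = "" both sides strip to "")
def normCookieChars (s : List Char) : List Char :=
  normCookieCore (PySem.Chars.strip s)

-- `_normalized_cookie_path(value)` for the Optional[str] argument
def normCookie (value : Option String) : List Char :=
  normCookieChars (value.getD "").toList

def path_variants_py (value : Option String) : List String :=
  let raw := PySem.Chars.strip (value.getD "").toList
  let candidates : List (List Char) := if raw ≠ [] then [raw] else []
  let normalized := normCookie value
  let candidates := candidates ++ [normalized]
  let candidates := if normalized ≠ ['/'] then candidates ++ [normalized ++ ['/']] else candidates
  let variants := candidates.foldl (fun variants candidate =>
    let nc := normCookieChars candidate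
    let variants := if nc ∈ variants then variants else variants ++ [nc]
    if nc ≠ ['/'] ∧ PySem.Chars.endswith nc ['/'] = false ∧ (nc ++ ['/']) ∉ variants
    then variants ++ [nc ++ ['/']] else variants) []
  variants.map String.ofList

-- ===== PORT B =====
def path_variants_py_alt (value : Option String) : List String :=
  let base := normCookie value
  if base = ['/'] then ["/"]
  else
    let variants := [String.ofList base, String.ofList (base ++ ['/'])]
    let again := normCookieChars base
    if again ≠ base then
      variants ++ (if again = ['/'] then ["/"]
                   else [String.ofList again, String.ofList (again ++ ['/'])])
    else variants

-- ===== PRECONDITION & SPEC =====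
def Spec_path_variants_py (value : Option String) (out : List String) : Prop := out = path_variants_py_alt value
instance (value : Option String) (out : List String) : Decidable (Spec_path_variants_py value out) := by unfold Spec_path_variants_py; infer_instance

-- ===== CLAIM (what is proved, stated in full; the proofs are below) =====
def Claim_equal_path_variants_py : Prop := ∀ (value : Option String), Dom_path_variants_py value → Spec_path_variants_py value (path_variants_py value)

-- ===== LEMMAS AND PROOFS =====

lemma head?_dropWhile (p : Char → Bool) (cs : List Char) (c : Char)
    (h : (cs.dropWhile p).head? = some c) : p c = false := by
  induction cs with
  | nil => simp at h
  | cons a t ih =>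
    rw [List.dropWhile_cons] at h
    split at h
    · exact ih h
    · simp at h
      subst h
      simp_all

lemma prefix_head? {l1 l2 : List Char} (h : l1 <+: l2) {c : Char}
    (hc : l1.head? = some c) : l2.head? = some c := by
  obtain ⟨t, rfl⟩ := h
  cases l1 with
  | nil => simp at hc
  | cons a u => simpa using hc

lemma singleton_prefix_iff (cs : List Char) (c : Char) : [c] <+: cs ↔ cs.head? = some c := by
  cases cs with
  | nil => simp
  | cons a t => simp [List.cons_prefix_cons, eq_comm]

lemma singleton_suffix_iff (cs : List Char) (c : Char) : [c] <:+ cs ↔ cs.getLast? = some c := by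
  constructor
  · rintro ⟨t, rfl⟩; simp
  · intro h
    cases cs using List.reverseRecOn with
    | nil => simp at h
    | append_singleton t a => simp at h; subst h; exact ⟨t, rfl⟩

lemma rstripBy_getLast? (p : Char → Bool) (cs : List Char) (c : Char)
    (h : ((cs.reverse.dropWhile p).reverse).getLast? = some c) : p c = false := by
  rw [List.getLast?_reverse] at h
  exact head?_dropWhile p cs.reverse c h

lemma rstripBy_prefix (p : Char → Bool) (cs : List Char) :
    (cs.reverse.dropWhile p).reverse <+: cs := by
  have h := List.dropWhile_suffix (l := cs.reverse) p
  obtain ⟨t, ht⟩ := h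
  refine ⟨t.reverse, ?_⟩
  have := congrArg List.reverse ht
  simpa using this

lemma rstripBy_eq_self (p : Char → Bool) (cs : List Char)
    (h : ∀ c, cs.getLast? = some c → p c = false) : (cs.reverse.dropWhile p).reverse = cs := by
  cases hrev : cs.reverse with
  | nil => simp_all [List.reverse_eq_nil_iff]
  | cons a t =>
    have ha : p a = false := by
      apply h
      rw [← List.head?_reverse, hrev]
      simp
    rw [List.dropWhile_cons, ha]
    simp [← hrev]

lemma rstripBy_append (p : Char → Bool) (cs : List Char) (c : Char) (hc : p c = true) :
    (((cs ++ [c]).reverse.dropWhile p)).reverse = ((cs.reverse.dropWhile p)).reverse := by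
  simp [hc]


-- strip facts
lemma strip_head? (s : List Char) (c : Char) (h : (PySem.Chars.strip s).head? = some c) :
    PySem.Chars.isspace c = false := by
  unfold PySem.Chars.strip PySem.Chars.rstrip PySem.Chars.lstrip at h
  have hpre := rstripBy_prefix PySem.Chars.isspace (List.dropWhile PySem.Chars.isspace s)
  have h2 := prefix_head? hpre h
  exact head?_dropWhile _ _ _ h2

lemma strip_getLast? (s : List Char) (c : Char) (h : (PySem.Chars.strip s).getLast? = some c) :
    PySem.Chars.isspace c = false := by
  unfold PySem.Chars.strip PySem.Chars.rstrip at h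
  exact rstripBy_getLast? _ _ _ h

lemma strip_eq_self (s : List Char)
    (hh : ∀ c, s.head? = some c → PySem.Chars.isspace c = false)
    (hl : ∀ c, s.getLast? = some c → PySem.Chars.isspace c = false) :
    PySem.Chars.strip s = s := by
  unfold PySem.Chars.strip PySem.Chars.lstrip PySem.Chars.rstrip
  have h1 : List.dropWhile PySem.Chars.isspace s = s := by
    cases s with
    | nil => simp
    | cons a t =>
      rw [List.dropWhile_cons, hh a (by simp)]
      simp
  rw [h1]
  exact rstripBy_eq_self _ _ hl

lemma strip_idem (s : List Char) :
    PySem.Chars.strip (PySem.Chars.strip s) = PySem.Chars.strip s :=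
  strip_eq_self _ (strip_head? s) (strip_getLast? s)


lemma prefix_head?_eq {l1 l2 : List Char} (h : l1 <+: l2) (hne : l1 ≠ []) :
    l1.head? = l2.head? := by
  obtain ⟨t, rfl⟩ := h
  cases l1 with
  | nil => exact absurd rfl hne
  | cons a u => simp

-- characterization of the helper's output
lemma normCore_good (path : List Char) :
    (normCookieCore path).head? = some '/' ∧
      (normCookieCore path = ['/'] ∨ (normCookieCore path).getLast? ≠ some '/') := by
  unfold normCookieCore
  by_cases h0 : path = []
  · simp [h0]
  · simp only [h0, if_false]
    set p1 := if PySem.Chars.startswith path ['/'] then path else '/' :: path with hp1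
    have hp1h : p1.head? = some '/' := by
      rw [hp1]
      split
      · rename_i hsw
        rw [PySem.Chars.startswith] at hsw
        exact (singleton_prefix_iff path '/').mp (List.isPrefixOf_iff_prefix.mp hsw)
      · simp
    set p2 := if decide (1 < p1.length) && PySem.Chars.endswith p1 ['/']
              then pvRstripSlash p1 else p1 with hp2
    by_cases h2 : p2 = []
    · simp [h2]
    · simp only [h2, if_false]
      refine ⟨?_, ?_⟩
      · rw [hp2]
        split
        · have hpre := rstripBy_prefix (fun c => c == '/') p1
          have hne : pvRstripSlash p1 ≠ [] := by
            rw [hp2] at h2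
            split at h2
            · exact h2
            · rename_i hcond hcond2
              exact h2
          rw [pvRstripSlash] at hne ⊢
          rw [prefix_head?_eq hpre hne]
          exact hp1h
        · exact hp1h
      · rw [hp2]
        split
        · right
          intro hlast
          have := rstripBy_getLast? (fun c => c == '/') p1 '/' hlast
          simp at this
        · rename_i hc
          by_cases hlen : 1 < p1.length
          · right
            intro hlast
            have he : PySem.Chars.endswith p1 ['/'] = true := by
              rw [PySem.Chars.endswith]
              exact List.isSuffixOf_iff_suffix.mpr ((singleton_suffix_iff p1 '/').mpr hlast)
            simp [hlen, he] at hc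
          · left
            cases hp : p1 with
            | nil => rw [hp] at hp1h; simp at hp1h
            | cons a t =>
              rw [hp] at hp1h hlen
              simp at hp1h
              cases t with
              | nil => simp [hp1h]
              | cons b u => simp at hlen

lemma normCore_ne_nil (path : List Char) : normCookieCore path ≠ [] := by
  intro h
  have := (normCore_good path).1
  rw [h] at this
  simp at this

lemma endswith_slash_false (n : List Char) (h : n.getLast? ≠ some '/') :
    PySem.Chars.endswith n ['/'] = false := by
  rw [PySem.Chars.endswith]
  rw [Bool.eq_false_iff]
  intro hc
  exact h ((singleton_suffix_iff n '/').mp (List.isSuffixOf_iff_suffix.mp hc))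

lemma normCore_last (path : List Char) (h : normCookieCore path ≠ ['/']) :
    (normCookieCore path).getLast? ≠ some '/' :=
  (normCore_good path).2.resolve_left h

lemma norm_append_slash (path : List Char) (h : normCookieCore path ≠ ['/']) :
    normCookieChars (normCookieCore path ++ ['/']) = normCookieCore path := by
  have hh := (normCore_good path).1
  have hl := normCore_last path h
  have hne := normCore_ne_nil path
  set n := normCookieCore path with hn
  have hstrip : PySem.Chars.strip (n ++ ['/']) = n ++ ['/'] := by
    apply strip_eq_self
    · intro c hc
      rw [List.head?_append_of_ne_nil _ hne, hh] at hc
      cases hc; decide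
    · intro c hc
      rw [List.getLast?_concat] at hc
      cases hc; decide
  rw [normCookieChars, hstrip]
  rw [normCookieCore]
  have hne2 : n ++ ['/'] ≠ [] := by simp
  simp only [hne2, if_false]
  have hsw : PySem.Chars.startswith (n ++ ['/']) ['/'] = true := by
    rw [PySem.Chars.startswith, List.isPrefixOf_iff_prefix, singleton_prefix_iff,
      List.head?_append_of_ne_nil _ hne, hh]
  have hlen : decide (1 < (n ++ ['/']).length) = true := by
    have hpos := List.length_pos_of_ne_nil hne
    simp
    omega
  have hew : PySem.Chars.endswith (n ++ ['/']) ['/'] = true := by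
    rw [PySem.Chars.endswith, List.isSuffixOf_iff_suffix, singleton_suffix_iff,
      List.getLast?_concat]
  rw [hsw]
  simp only [if_true, hlen, hew, Bool.and_self]
  have hrs : pvRstripSlash (n ++ ['/']) = n := by
    rw [pvRstripSlash, rstripBy_append _ _ _ (by decide)]
    apply rstripBy_eq_self
    intro c hc
    rw [Bool.eq_false_iff]
    intro hceq
    rw [beq_iff_eq] at hceq
    subst hceq
    exact hl hc
  rw [hrs]
  simp [hne]

lemma pv_main_eq (value : Option String) : path_variants_py value = path_variants_py_alt value := by
  unfold path_variants_py path_variants_py_alt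
  have hid : normCookieChars (PySem.Chars.strip (value.getD "").toList)
      = normCookie value := by
    rw [normCookie, normCookieChars, normCookieChars, strip_idem]
  set s := (value.getD "").toList with hs
  set raw := PySem.Chars.strip s with hraw
  have hnorm : normCookie value = normCookieCore raw := rfl
  by_cases hr : raw = []
  · -- empty: normalized = ['/']
    have h1 : normCookie value = ['/'] := by rw [hnorm, hr]; decide
    have h2 : normCookieChars ['/'] = ['/'] := by decide
    simp [hr, h1, h2]
  · have hA : normCookieChars raw = normCookie value := by rw [hraw]; exact hid
    have hgood := normCore_good raw
    rw [← hnorm] at hgood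
    set n := normCookie value with hn
    have hne : n ≠ [] := by rw [hnorm]; exact normCore_ne_nil raw
    by_cases h1 : n = ['/']
    · have hB : normCookieChars ['/'] = ['/'] := by decide
      have hslash : String.ofList ['/'] = "/" := rfl
      simp [hr, hA, hB, h1, hslash]
    · have h1' : ¬(['/'] = n) := fun h => h1 h.symm
      have hslash : String.ofList ['/'] = "/" := rfl
      have hlast : n.getLast? ≠ some '/' := hgood.2.resolve_left h1
      have hendn : PySem.Chars.endswith n ['/'] = false := endswith_slash_false n hlast
      have happ : normCookieChars (n ++ ['/']) = n := by
        rw [hnorm] at h1 ⊢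
        exact norm_append_slash raw h1
      have hmgood := normCore_good (PySem.Chars.strip n)
      have hmdef : normCookieChars n = normCookieCore (PySem.Chars.strip n) := rfl
      rw [← hmdef] at hmgood
      set m := normCookieChars n with hm
      have hmne : m ≠ [] := by rw [hm]; exact normCore_ne_nil _
      have f1 : ¬(n ++ ['/'] = n) := by simp
      by_cases hmn : m = n
      · simp [hr, hA, h1, hslash, hendn, ← hm, hmn, happ, f1]
      · by_cases hm1 : m = ['/']
        · simp [hr, hA, h1, h1', hne, hslash, hendn, ← hm, hm1, happ, f1]
        · have hmlast : m.getLast? ≠ some '/' := hmgood.2.resolve_left hm1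
          have hendm : PySem.Chars.endswith m ['/'] = false := endswith_slash_false m hmlast
          have f2 : ¬(m = n ++ ['/']) := by
            intro hc
            apply hmlast
            rw [hc, List.getLast?_concat]
          have f3 : ¬(m ++ ['/'] = n) := by
            intro hc
            apply hlast
            rw [← hc, List.getLast?_concat]
          have f4 : ¬(m ++ ['/'] = n ++ ['/']) := by
            intro hc
            exact hmn (List.append_cancel_right hc)
          simp [hr, hA, h1, hslash, hendn, ← hm, hmn, hm1, happ, f1, f2, f3, f4, hendm]

-- ===== VERDICT (by name: the statement is the Claim_ definition above) =====
theorem path_variants_py_spec : Claim_equal_path_variants_py := by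
  intro value _
  unfold Spec_path_variants_py
  exact pv_main_eq value
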